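-- pv_equiv track=rewrite | github.com/CodingOnionFarmer/JNH-BOJ-SWEA | 프로그래머스/2/150368. 이모티콘 할인행사/이모티콘 할인행사.py | solution
-- ===== SOURCE A (Python) =====
-- def solution(users, emoticons):
--     answer = [0,0]
--     n = len(users)
--     m = len(emoticons)
--     discounted = [[] for _ in range(m)]
--     for i in range(m):
--         pdt = emoticons[i] // 10  # price divided by ten
--         for j in range(9, 5, -1):
--             discounted[i].append(pdt*j)
--     for code in range(4**m):  # 4진수 코드, 1330이면 각 이모티콘을 20%, 40%, 40%, 10% 할인하기
--         membership = 0
--         sales = 0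
--         price_rate = []
--         for i in range(m):
--             price_rate.append(code%4)  # price_rate가 0면 10%, 1이면 20%, 2이면 30%, 3이면 40%할인
--             code //= 4
--         for ratio, price in users:
--             bought = 0
--             for i in range(m):
--                 if price_rate[i] * 10 + 10 >= ratio:
--                     bought += discounted[i][price_rate[i]]
--             if bought >= price:
--                 membership += 1
--             else:
--                 sales += bought
--         if membership > answer[0]:
--             answer[0] = membership
--             answer[1] = sales
--         elif membership == answer[0] and sales > answer[1]:
--             answer[1] = sales
--     return answer
-- ===== SOURCE B (Python) =====
-- def solution(users, emoticons):
--     m = len(emoticons)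
--     pdts = [e // 10 for e in emoticons]
--
--     def evaluate(rates):
--         membership = 0
--         sales = 0
--         for ratio, price in users:
--             bought = 0
--             for pdt, d in zip(pdts, rates):
--                 if d * 10 + 10 >= ratio:
--                     bought += pdt * (9 - d)
--             if bought >= price:
--                 membership += 1
--             else:
--                 sales += bought
--         return (membership, sales)
--
--     def best(k, rates):
--         # DFS: pick a discount rate for emoticon k-1, prepend it, recurse
--         if k == 0:
--             return evaluate(rates)
--         res = best(k - 1, [0] + rates)
--         for d in (1, 2, 3):
--             res = max(res, best(k - 1, [d] + rates))
--         return res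
--
--     top = max((0, 0), best(m, []))
--     return [top[0], top[1]]
-- ===== Notes on version B (the rewrite author's own statement) =====
-- stated objective: alternative
-- what changed: Replaces the base-4 integer decode of each of the 4^m codes and the in-place best-answer update with a recursive DFS over the m-level choice tree that returns (members, sales) pairs and combines them with Python's lexicographic tuple max.
import Mathlib
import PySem

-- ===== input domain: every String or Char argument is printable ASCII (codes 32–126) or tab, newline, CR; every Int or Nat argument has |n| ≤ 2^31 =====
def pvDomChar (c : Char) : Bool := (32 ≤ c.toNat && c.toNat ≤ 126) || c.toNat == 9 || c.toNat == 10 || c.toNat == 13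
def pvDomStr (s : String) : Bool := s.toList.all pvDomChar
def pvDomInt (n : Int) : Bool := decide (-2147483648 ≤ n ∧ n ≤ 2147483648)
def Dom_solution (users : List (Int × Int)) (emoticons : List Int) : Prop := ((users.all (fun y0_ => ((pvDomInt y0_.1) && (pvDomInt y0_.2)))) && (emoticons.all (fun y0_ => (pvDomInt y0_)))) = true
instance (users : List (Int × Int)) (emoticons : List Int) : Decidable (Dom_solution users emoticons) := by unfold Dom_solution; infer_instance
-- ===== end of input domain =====

-- B replaces A's base-4 integer decode over all 4^m codes by a recursive DFS over the
-- m-level choice tree combining (members, sales) pairs with lexicographic tuple max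
-- (objective: alternative; same exhaustive cost).

-- ===== PORT A =====
def solution (users : List (Int × Int)) (emoticons : List Int) : List Int :=
  let m : Int := (emoticons.length : Int)
  -- A fills a pre-made list of empty rows index by index; ported as a map over range(m),
  -- each row built by the same appending loop over range(9, 5, -1)
  let discounted : List (List Int) :=
    (PySem.List.pyRange 0 m 1).map (fun i =>
      let pdt := PySem.Int.floordiv (PySem.List.pyGetD emoticons i 0) 10
      (PySem.List.pyRange 9 5 (-1)).foldl (fun acc j => acc ++ [pdt * j]) [])
  let ans : Int × Int :=
    (PySem.List.pyRange 0 ((4 : Int) ^ emoticons.length) 1).foldl (fun answer code =>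
      let pr : List Int :=
        ((PySem.List.pyRange 0 m 1).foldl
          (fun (st : List Int × Int) _i =>
            (st.1 ++ [PySem.Int.mod st.2 4], PySem.Int.floordiv st.2 4))
          ([], code)).1
      let ms : Int × Int :=
        users.foldl (fun (acc : Int × Int) u =>
          let bought : Int :=
            (PySem.List.pyRange 0 m 1).foldl (fun b i =>
              -- price_rate[i] and discounted[i][price_rate[i]]: always in range (digits lie in [0,4))
              if PySem.List.pyGetD pr i 0 * 10 + 10 ≥ u.1 then
                b + PySem.List.pyGetD (PySem.List.pyGetD discounted i []) (PySem.List.pyGetD pr i 0) 0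
              else b) 0
          if bought ≥ u.2 then (acc.1 + 1, acc.2) else (acc.1, acc.2 + bought)) (0, 0)
      if ms.1 > answer.1 then ms
      else if ms.1 = answer.1 ∧ ms.2 > answer.2 then (answer.1, ms.2)
      else answer) (0, 0)
  [ans.1, ans.2]

-- ===== PORT B =====
-- B's evaluate(rates): the user loop over zip(pdts, rates)
def pvEval (pdts : List Int) (users : List (Int × Int)) (rates : List Int) : Int × Int :=
  users.foldl (fun (acc : Int × Int) u =>
    let bought : Int :=
      (pdts.zip rates).foldl (fun b pd =>
        if pd.2 * 10 + 10 ≥ u.1 then b + pd.1 * (9 - pd.2) else b) 0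
    if bought ≥ u.2 then (acc.1 + 1, acc.2) else (acc.1, acc.2 + bought)) (0, 0)

-- Python max of two (Int, Int) tuples (lexicographic, first kept on a tie)
def pvMax (p q : Int × Int) : Int × Int :=
  if p.1 < q.1 ∨ (p.1 = q.1 ∧ p.2 < q.2) then q else p

-- B's best(k, rates): DFS picking a rate for emoticon k-1 and prepending
def pvBest (pdts : List Int) (users : List (Int × Int)) : Nat → List Int → Int × Int
  | 0, rates => pvEval pdts users rates
  | k + 1, rates =>
    ([1, 2, 3] : List Int).foldl
      (fun res d => pvMax res (pvBest pdts users k (d :: rates)))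
      (pvBest pdts users k (0 :: rates))

def solution_alt (users : List (Int × Int)) (emoticons : List Int) : List Int :=
  let pdts := emoticons.map (fun e => PySem.Int.floordiv e 10)
  let top := pvMax (0, 0) (pvBest pdts users emoticons.length [])
  [top.1, top.2]

-- ===== PRECONDITION & SPEC =====
def Spec_solution (users : List (Int × Int)) (emoticons : List Int) (out : List Int) : Prop := out = solution_alt users emoticons
instance (users : List (Int × Int)) (emoticons : List Int) (out : List Int) : Decidable (Spec_solution users emoticons out) := by unfold Spec_solution; infer_instance

-- ===== CLAIM (what is proved, stated in full; the proofs are below) =====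
def Claim_equal_solution : Prop := ∀ (users : List (Int × Int)) (emoticons : List Int), Dom_solution users emoticons → Spec_solution users emoticons (solution users emoticons)

-- ===== LEMMAS AND PROOFS =====

-- little-endian base-4 digits of c, k of them
def pvDecode : Nat → Int → List Int
  | 0, _ => []
  | k + 1, c => PySem.Int.mod c 4 :: pvDecode k (PySem.Int.floordiv c 4)

theorem pvDecode_length (k : Nat) (c : Int) : (pvDecode k c).length = k := by
  induction k generalizing c with
  | zero => rfl
  | succ k ih => simp [pvDecode, ih]

theorem pvDecode_mem (k : Nat) (c : Int) (r : Int) (h : r ∈ pvDecode k c) : 0 ≤ r ∧ r < 4 := by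
  induction k generalizing c with
  | zero => simp [pvDecode] at h
  | succ k ih =>
    simp only [pvDecode, List.mem_cons] at h
    rcases h with h | h
    · subst h
      exact ⟨PySem.Int.mod_nonneg _ (by omega), PySem.Int.mod_lt _ (by omega)⟩
    · exact ih _ h

-- digits of a shifted code: the top digit lands at the end
theorem pvDecode_shift (k : Nat) (d : Int) (hd0 : 0 ≤ d) (hd : d < 4) :
    ∀ c : Int, 0 ≤ c → c < 4 ^ k →
      pvDecode (k + 1) (d * 4 ^ k + c) = pvDecode k c ++ [d] := by
  induction k with
  | zero =>
    intro c hc0 hc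
    have hc' : c = 0 := by simpa using (by omega : c = 0)
    subst hc'
    simp [pvDecode, Int.emod_eq_of_lt hd0 (by omega)]
  | succ k ih =>
    intro c hc0 hc
    have h4 : (0:Int) < 4 := by omega
    have hsplit : d * 4 ^ (k + 1) + c = c + d * 4 ^ k * 4 := by ring
    have hmod : PySem.Int.mod (d * 4 ^ (k + 1) + c) 4 = PySem.Int.mod c 4 := by
      rw [PySem.Int.mod_eq_emod_of_pos h4, PySem.Int.mod_eq_emod_of_pos h4, hsplit]
      generalize d * 4 ^ k = t
      omega
    have hdiv : PySem.Int.floordiv (d * 4 ^ (k + 1) + c) 4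
        = d * 4 ^ k + PySem.Int.floordiv c 4 := by
      rw [PySem.Int.floordiv_eq_ediv_of_pos h4, PySem.Int.floordiv_eq_ediv_of_pos h4, hsplit]
      generalize d * 4 ^ k = t
      omega
    have hq0 : 0 ≤ PySem.Int.floordiv c 4 := by
      rw [PySem.Int.floordiv_eq_ediv_of_pos h4]
      omega
    have hq : PySem.Int.floordiv c 4 < 4 ^ k := by
      rw [PySem.Int.floordiv_eq_ediv_of_pos h4]
      have hN : (0:Int) < 4 ^ k := by positivity
      have hc' : c < 4 ^ k * 4 := by calc c < 4 ^ (k + 1) := hc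
                                       _ = 4 ^ k * 4 := by ring
      generalize 4 ^ k = N at *
      omega
    show pvDecode (k + 1 + 1) (d * 4 ^ (k + 1) + c) = pvDecode (k + 1) c ++ [d]
    rw [show pvDecode (k + 1 + 1) (d * 4 ^ (k + 1) + c)
          = PySem.Int.mod (d * 4 ^ (k + 1) + c) 4
            :: pvDecode (k + 1) (PySem.Int.floordiv (d * 4 ^ (k + 1) + c) 4) from rfl,
        hmod, hdiv, ih _ hq0 hq]
    rfl

-- A's price_rate loop builds exactly the base-4 digit list
theorem pvPrFold (k : Nat) : ∀ (a c : Int) (acc : List Int),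
    ((PySem.List.pyRange a (a + (k : Int)) 1).foldl
      (fun (st : List Int × Int) _i =>
        (st.1 ++ [PySem.Int.mod st.2 4], PySem.Int.floordiv st.2 4)) (acc, c)).1
    = acc ++ pvDecode k c := by
  induction k with
  | zero =>
    intro a c acc
    rw [PySem.List.pyRange_one_eq_nil (by omega)]
    simp [pvDecode]
  | succ k ih =>
    intro a c acc
    rw [show a + ((k + 1 : Nat) : Int) = (a + 1) + (k : Int) by push_cast; ring]
    rw [PySem.List.pyRange_one_cons (by omega : a < (a + 1) + (k:Int))]
    simp only [List.foldl_cons]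
    rw [ih (a + 1) (PySem.Int.floordiv c 4) (acc ++ [PySem.Int.mod c 4])]
    simp [pvDecode]

theorem pvPrFold0 (k : Nat) (c : Int) :
    ((PySem.List.pyRange 0 (k : Int) 1).foldl
      (fun (st : List Int × Int) _i =>
        (st.1 ++ [PySem.Int.mod st.2 4], PySem.Int.floordiv st.2 4)) ([], c)).1
    = pvDecode k c := by
  have := pvPrFold k 0 c []
  simpa using this

-- A's answer update is Python's lexicographic tuple max
theorem pvStep_eq (p q : Int × Int) :
    (if q.1 > p.1 then q else if q.1 = p.1 ∧ q.2 > p.2 then (p.1, q.2) else p)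
    = pvMax p q := by
  obtain ⟨p1, p2⟩ := p; obtain ⟨q1, q2⟩ := q
  simp only [pvMax]
  split_ifs <;> first
    | rfl
    | (simp only [Prod.mk.injEq, and_true]; omega)

theorem pvMax_assoc (x y z : Int × Int) :
    pvMax (pvMax x y) z = pvMax x (pvMax y z) := by
  obtain ⟨x1, x2⟩ := x; obtain ⟨y1, y2⟩ := y; obtain ⟨z1, z2⟩ := z
  simp only [pvMax]
  split_ifs <;> first
    | rfl
    | (simp only [Prod.mk.injEq]; omega)

-- the row-building loop of A, as a literal list
theorem pvRowFold (p : Int) :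
    (PySem.List.pyRange 9 5 (-1)).foldl (fun acc j => acc ++ [p * j]) []
    = [p * 9, p * 8, p * 7, p * 6] := by
  have h : PySem.List.pyRange 9 5 (-1) = [9, 8, 7, 6] := by decide
  rw [h]; simp [List.foldl]

-- the discounted-price row of one emoticon
def pvRowOf (e : Int) : List Int :=
  [PySem.Int.floordiv e 10 * 9, PySem.Int.floordiv e 10 * 8,
   PySem.Int.floordiv e 10 * 7, PySem.Int.floordiv e 10 * 6]

theorem pvRow_get (p r : Int) (h0 : 0 ≤ r) (h4 : r < 4) :
    PySem.List.pyGetD [p * 9, p * 8, p * 7, p * 6] r 0 = p * (9 - r) := by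
  interval_cases r <;>
    simp [PySem.List.pyGetD, PySem.List.pyGet?, PySem.List.pyIdx?]

-- A's discounted table is the row map over the emoticon list
theorem pvDiscounted (es : List Int) :
    (PySem.List.pyRange 0 ((es.length : Int)) 1).map (fun i =>
      (PySem.List.pyRange 9 5 (-1)).foldl
        (fun acc j => acc ++ [PySem.Int.floordiv (PySem.List.pyGetD es i 0) 10 * j]) [])
    = es.map pvRowOf := by
  have h1 : (fun i =>
      (PySem.List.pyRange 9 5 (-1)).foldl
        (fun acc j => acc ++ [PySem.Int.floordiv (PySem.List.pyGetD es i 0) 10 * j]) [])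
      = (fun i => pvRowOf (PySem.List.pyGetD es i 0)) := by
    funext i
    rw [pvRowFold]
    rfl
  rw [h1,
    show (fun i => pvRowOf (PySem.List.pyGetD es i 0))
      = pvRowOf ∘ (fun i => PySem.List.pyGetD es i 0) from rfl,
    ← List.map_map, PySem.List.map_pyGetD_pyRange_zero']

-- A's index-driven inner loop is the fold over the zipped table
theorem pvBoughtIdx (disc : List (List Int)) (pr : List Int) (ratio : Int)
    (hlen : disc.length = pr.length) :
    (PySem.List.pyRange 0 ((pr.length : Int)) 1).foldl (fun b i =>
      if PySem.List.pyGetD pr i 0 * 10 + 10 ≥ ratio then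
        b + PySem.List.pyGetD (PySem.List.pyGetD disc i []) (PySem.List.pyGetD pr i 0) 0
      else b) 0
    = (disc.zip pr).foldl (fun b p =>
        if p.2 * 10 + 10 ≥ ratio then b + PySem.List.pyGetD p.1 p.2 0 else b) 0 := by
  have hZ : (disc.zip pr).length = pr.length := by simp [hlen]
  have h1 := PySem.List.foldl_pyRange_zero_pyGetD' (disc.zip pr) (([], 0) : List Int × Int)
      (fun b (p : List Int × Int) =>
        if p.2 * 10 + 10 ≥ ratio then b + PySem.List.pyGetD p.1 p.2 0 else b) 0
  rw [show (((disc.zip pr).length : Int)) = ((pr.length : Int)) by exact_mod_cast congrArg Nat.cast hZ] at h1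
  rw [← h1]
  apply PySem.List.foldl_congr_mem
  intro b i hi
  rw [PySem.List.mem_pyRange_one] at hi
  have hiZ : i < ((disc.zip pr).length : Int) := by rw [hZ]; exact hi.2
  have hiN : i.toNat < (disc.zip pr).length := by omega
  rw [PySem.List.pyGetD_eq_getElem _ _ hi.1 hiZ, List.getElem_zip,
    PySem.List.pyGetD_eq_getElem pr 0 hi.1 hi.2,
    PySem.List.pyGetD_eq_getElem disc [] hi.1 (by omega)]

-- replacing each table row by the arithmetic formula
theorem pvBought (ratio : Int) : ∀ (es rs : List Int), (∀ r ∈ rs, 0 ≤ r ∧ r < 4) → ∀ b : Int,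
    ((es.map pvRowOf).zip rs).foldl (fun b p =>
      if p.2 * 10 + 10 ≥ ratio then b + PySem.List.pyGetD p.1 p.2 0 else b) b
    = ((es.map (fun e => PySem.Int.floordiv e 10)).zip rs).foldl (fun b p =>
        if p.2 * 10 + 10 ≥ ratio then b + p.1 * (9 - p.2) else b) b := by
  intro es
  induction es with
  | nil => intro rs _ b; simp
  | cons e es ih =>
    intro rs hr b
    cases rs with
    | nil => simp
    | cons r rs =>
      simp only [List.map_cons, List.zip_cons_cons, List.foldl_cons]
      rw [pvRowOf, pvRow_get _ r (hr r (by simp)).1 (hr r (by simp)).2]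
      exact ih rs (fun x hx => hr x (by simp [hx])) _

-- A's user loop, with the table rows in place, is B's evaluate
theorem pvEvalA (users : List (Int × Int)) (es : List Int) (pr : List Int)
    (hp : es.length = pr.length) (hr : ∀ r ∈ pr, 0 ≤ r ∧ r < 4) :
    users.foldl (fun (acc : Int × Int) u =>
      if (PySem.List.pyRange 0 ((pr.length : Int)) 1).foldl (fun b i =>
            if PySem.List.pyGetD pr i 0 * 10 + 10 ≥ u.1 then
              b + PySem.List.pyGetD (PySem.List.pyGetD (es.map pvRowOf) i [])
                    (PySem.List.pyGetD pr i 0) 0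
            else b) 0 ≥ u.2 then
        (acc.1 + 1, acc.2)
      else
        (acc.1, acc.2 +
          (PySem.List.pyRange 0 ((pr.length : Int)) 1).foldl (fun b i =>
            if PySem.List.pyGetD pr i 0 * 10 + 10 ≥ u.1 then
              b + PySem.List.pyGetD (PySem.List.pyGetD (es.map pvRowOf) i [])
                    (PySem.List.pyGetD pr i 0) 0
            else b) 0)) (0, 0)
    = pvEval (es.map (fun e => PySem.Int.floordiv e 10)) users pr := by
  simp only [pvEval]
  apply PySem.List.foldl_congr_mem
  intro acc u _
  rw [pvBoughtIdx (es.map pvRowOf) pr u.1 (by simp [hp]), pvBought u.1 es pr hr 0]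

-- same as pvEvalA, with the loop bound named
theorem pvEvalA' (users : List (Int × Int)) (es : List Int) (pr : List Int) (m : Nat)
    (hm : pr.length = m) (hp : es.length = m) (hr : ∀ r ∈ pr, 0 ≤ r ∧ r < 4) :
    users.foldl (fun (acc : Int × Int) u =>
      if (PySem.List.pyRange 0 ((m : Int)) 1).foldl (fun b i =>
            if PySem.List.pyGetD pr i 0 * 10 + 10 ≥ u.1 then
              b + PySem.List.pyGetD (PySem.List.pyGetD (es.map pvRowOf) i [])
                    (PySem.List.pyGetD pr i 0) 0
            else b) 0 ≥ u.2 then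
        (acc.1 + 1, acc.2)
      else
        (acc.1, acc.2 +
          (PySem.List.pyRange 0 ((m : Int)) 1).foldl (fun b i =>
            if PySem.List.pyGetD pr i 0 * 10 + 10 ≥ u.1 then
              b + PySem.List.pyGetD (PySem.List.pyGetD (es.map pvRowOf) i [])
                    (PySem.List.pyGetD pr i 0) 0
            else b) 0)) (0, 0)
    = pvEval (es.map (fun e => PySem.Int.floordiv e 10)) users pr := by
  subst hm
  exact pvEvalA users es pr (by omega) hr

-- the DFS equals A's linear scan over all 4^k codes, one suffix at a time
theorem pvMain (pdts : List Int) (users : List (Int × Int)) :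
    ∀ (k : Nat) (suffix : List Int) (a : Int × Int),
    (PySem.List.pyRange 0 ((4 : Int) ^ k) 1).foldl
      (fun acc c => pvMax acc (pvEval pdts users (pvDecode k c ++ suffix))) a
    = pvMax a (pvBest pdts users k suffix) := by
  intro k
  induction k with
  | zero =>
    intro suffix a
    rw [show ((4 : Int) ^ 0) = 0 + 1 by norm_num, PySem.List.pyRange_one_singleton]
    simp [pvBest, pvDecode]
  | succ k ih =>
    intro suffix a
    have hN : (0 : Int) < 4 ^ k := by positivity
    have ih' : ∀ (suffix : List Int) (a : Int × Int),
        (List.range ((4 : Int) ^ k).toNat).foldl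
          (fun acc (j : Nat) => pvMax acc (pvEval pdts users (pvDecode k (j : Int) ++ suffix))) a
        = pvMax a (pvBest pdts users k suffix) := by
      intro suffix a
      have h := ih suffix a
      rw [PySem.List.pyRange_one, List.foldl_map] at h
      simpa using h
    have hblock : ∀ (d : Int), 0 ≤ d → d < 4 → ∀ (lo hi : Int),
        lo = d * 4 ^ k → hi = lo + 4 ^ k → ∀ (a : Int × Int),
        (PySem.List.pyRange lo hi 1).foldl
          (fun acc c => pvMax acc (pvEval pdts users (pvDecode (k + 1) c ++ suffix))) a
        = pvMax a (pvBest pdts users k (d :: suffix)) := by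
      intro d hd0 hd4 lo hi hlo hhi a
      subst hlo hhi
      rw [PySem.List.pyRange_one, show d * 4 ^ k + 4 ^ k - d * 4 ^ k = 4 ^ k by ring,
        List.foldl_map]
      rw [PySem.List.foldl_congr_mem _ _
        (fun acc (j : Nat) => pvMax acc (pvEval pdts users (pvDecode k (j : Int) ++ (d :: suffix)))) a
        ?_]
      · exact ih' (d :: suffix) a
      · intro acc j hj
        rw [List.mem_range] at hj
        have hj' : (j : Int) < 4 ^ k := by omega
        rw [pvDecode_shift k d hd0 hd4 (j : Int) (by omega) hj']
        rw [List.append_assoc, List.singleton_append]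
    have hpow : (4 : Int) ^ (k + 1) = 4 * 4 ^ k := by ring
    rw [hpow,
      PySem.List.pyRange_one_append 0 (4 ^ k) (4 * 4 ^ k) (by omega) (by omega),
      PySem.List.pyRange_one_append (4 ^ k) (2 * 4 ^ k) (4 * 4 ^ k) (by omega) (by omega),
      PySem.List.pyRange_one_append (2 * 4 ^ k) (3 * 4 ^ k) (4 * 4 ^ k) (by omega) (by omega),
      List.foldl_append, List.foldl_append, List.foldl_append]
    rw [hblock 0 (by omega) (by omega) 0 (4 ^ k) (by ring) (by ring) a,
      hblock 1 (by omega) (by omega) (4 ^ k) (2 * 4 ^ k) (by ring) (by ring) _,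
      hblock 2 (by omega) (by omega) (2 * 4 ^ k) (3 * 4 ^ k) (by ring) (by ring) _,
      hblock 3 (by omega) (by omega) (3 * 4 ^ k) (4 * 4 ^ k) (by ring) (by ring) _]
    simp only [pvBest, List.foldl_cons, List.foldl_nil, pvMax_assoc]

-- ===== VERDICT (by name: the statement is the Claim_ definition above) =====
theorem solution_spec : Claim_equal_solution := by
  intro users emoticons _
  show solution users emoticons = solution_alt users emoticons
  simp only [solution, solution_alt]
  rw [pvDiscounted emoticons]
  have hb : (fun (answer : Int × Int) (code : Int) =>
      if (List.foldl (fun (acc : Int × Int) u =>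
            if List.foldl (fun b i =>
                  if PySem.List.pyGetD (List.foldl (fun (st : List Int × Int) _i =>
                        (st.1 ++ [PySem.Int.mod st.2 4], PySem.Int.floordiv st.2 4))
                        ([], code) (PySem.List.pyRange 0 (emoticons.length : Int) 1)).1 i 0 * 10 + 10 ≥ u.1 then
                    b + PySem.List.pyGetD (PySem.List.pyGetD (List.map pvRowOf emoticons) i [])
                      (PySem.List.pyGetD (List.foldl (fun (st : List Int × Int) _i =>
                        (st.1 ++ [PySem.Int.mod st.2 4], PySem.Int.floordiv st.2 4))
                        ([], code) (PySem.List.pyRange 0 (emoticons.length : Int) 1)).1 i 0) 0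
                  else b) 0 (PySem.List.pyRange 0 (emoticons.length : Int) 1) ≥ u.2 then
              (acc.1 + 1, acc.2)
            else
              (acc.1, acc.2 + List.foldl (fun b i =>
                  if PySem.List.pyGetD (List.foldl (fun (st : List Int × Int) _i =>
                        (st.1 ++ [PySem.Int.mod st.2 4], PySem.Int.floordiv st.2 4))
                        ([], code) (PySem.List.pyRange 0 (emoticons.length : Int) 1)).1 i 0 * 10 + 10 ≥ u.1 then
                    b + PySem.List.pyGetD (PySem.List.pyGetD (List.map pvRowOf emoticons) i [])
                      (PySem.List.pyGetD (List.foldl (fun (st : List Int × Int) _i =>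
                        (st.1 ++ [PySem.Int.mod st.2 4], PySem.Int.floordiv st.2 4))
                        ([], code) (PySem.List.pyRange 0 (emoticons.length : Int) 1)).1 i 0) 0
                  else b) 0 (PySem.List.pyRange 0 (emoticons.length : Int) 1))) (0, 0) users).1 > answer.1 then
        List.foldl (fun (acc : Int × Int) u =>
            if List.foldl (fun b i =>
                  if PySem.List.pyGetD (List.foldl (fun (st : List Int × Int) _i =>
                        (st.1 ++ [PySem.Int.mod st.2 4], PySem.Int.floordiv st.2 4))
                        ([], code) (PySem.List.pyRange 0 (emoticons.length : Int) 1)).1 i 0 * 10 + 10 ≥ u.1 then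
                    b + PySem.List.pyGetD (PySem.List.pyGetD (List.map pvRowOf emoticons) i [])
                      (PySem.List.pyGetD (List.foldl (fun (st : List Int × Int) _i =>
                        (st.1 ++ [PySem.Int.mod st.2 4], PySem.Int.floordiv st.2 4))
                        ([], code) (PySem.List.pyRange 0 (emoticons.length : Int) 1)).1 i 0) 0
                  else b) 0 (PySem.List.pyRange 0 (emoticons.length : Int) 1) ≥ u.2 then
              (acc.1 + 1, acc.2)
            else
              (acc.1, acc.2 + List.foldl (fun b i =>
                  if PySem.List.pyGetD (List.foldl (fun (st : List Int × Int) _i =>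
                        (st.1 ++ [PySem.Int.mod st.2 4], PySem.Int.floordiv st.2 4))
                        ([], code) (PySem.List.pyRange 0 (emoticons.length : Int) 1)).1 i 0 * 10 + 10 ≥ u.1 then
                    b + PySem.List.pyGetD (PySem.List.pyGetD (List.map pvRowOf emoticons) i [])
                      (PySem.List.pyGetD (List.foldl (fun (st : List Int × Int) _i =>
                        (st.1 ++ [PySem.Int.mod st.2 4], PySem.Int.floordiv st.2 4))
                        ([], code) (PySem.List.pyRange 0 (emoticons.length : Int) 1)).1 i 0) 0
                  else b) 0 (PySem.List.pyRange 0 (emoticons.length : Int) 1))) (0, 0) users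
      else if (List.foldl (fun (acc : Int × Int) u =>
            if List.foldl (fun b i =>
                  if PySem.List.pyGetD (List.foldl (fun (st : List Int × Int) _i =>
                        (st.1 ++ [PySem.Int.mod st.2 4], PySem.Int.floordiv st.2 4))
                        ([], code) (PySem.List.pyRange 0 (emoticons.length : Int) 1)).1 i 0 * 10 + 10 ≥ u.1 then
                    b + PySem.List.pyGetD (PySem.List.pyGetD (List.map pvRowOf emoticons) i [])
                      (PySem.List.pyGetD (List.foldl (fun (st : List Int × Int) _i =>
                        (st.1 ++ [PySem.Int.mod st.2 4], PySem.Int.floordiv st.2 4))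
                        ([], code) (PySem.List.pyRange 0 (emoticons.length : Int) 1)).1 i 0) 0
                  else b) 0 (PySem.List.pyRange 0 (emoticons.length : Int) 1) ≥ u.2 then
              (acc.1 + 1, acc.2)
            else
              (acc.1, acc.2 + List.foldl (fun b i =>
                  if PySem.List.pyGetD (List.foldl (fun (st : List Int × Int) _i =>
                        (st.1 ++ [PySem.Int.mod st.2 4], PySem.Int.floordiv st.2 4))
                        ([], code) (PySem.List.pyRange 0 (emoticons.length : Int) 1)).1 i 0 * 10 + 10 ≥ u.1 then
                    b + PySem.List.pyGetD (PySem.List.pyGetD (List.map pvRowOf emoticons) i [])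
                      (PySem.List.pyGetD (List.foldl (fun (st : List Int × Int) _i =>
                        (st.1 ++ [PySem.Int.mod st.2 4], PySem.Int.floordiv st.2 4))
                        ([], code) (PySem.List.pyRange 0 (emoticons.length : Int) 1)).1 i 0) 0
                  else b) 0 (PySem.List.pyRange 0 (emoticons.length : Int) 1))) (0, 0) users).1 = answer.1 ∧
          (List.foldl (fun (acc : Int × Int) u =>
            if List.foldl (fun b i =>
                  if PySem.List.pyGetD (List.foldl (fun (st : List Int × Int) _i =>
                        (st.1 ++ [PySem.Int.mod st.2 4], PySem.Int.floordiv st.2 4))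
                        ([], code) (PySem.List.pyRange 0 (emoticons.length : Int) 1)).1 i 0 * 10 + 10 ≥ u.1 then
                    b + PySem.List.pyGetD (PySem.List.pyGetD (List.map pvRowOf emoticons) i [])
                      (PySem.List.pyGetD (List.foldl (fun (st : List Int × Int) _i =>
                        (st.1 ++ [PySem.Int.mod st.2 4], PySem.Int.floordiv st.2 4))
                        ([], code) (PySem.List.pyRange 0 (emoticons.length : Int) 1)).1 i 0) 0
                  else b) 0 (PySem.List.pyRange 0 (emoticons.length : Int) 1) ≥ u.2 then
              (acc.1 + 1, acc.2)
            else
              (acc.1, acc.2 + List.foldl (fun b i =>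
                  if PySem.List.pyGetD (List.foldl (fun (st : List Int × Int) _i =>
                        (st.1 ++ [PySem.Int.mod st.2 4], PySem.Int.floordiv st.2 4))
                        ([], code) (PySem.List.pyRange 0 (emoticons.length : Int) 1)).1 i 0 * 10 + 10 ≥ u.1 then
                    b + PySem.List.pyGetD (PySem.List.pyGetD (List.map pvRowOf emoticons) i [])
                      (PySem.List.pyGetD (List.foldl (fun (st : List Int × Int) _i =>
                        (st.1 ++ [PySem.Int.mod st.2 4], PySem.Int.floordiv st.2 4))
                        ([], code) (PySem.List.pyRange 0 (emoticons.length : Int) 1)).1 i 0) 0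
                  else b) 0 (PySem.List.pyRange 0 (emoticons.length : Int) 1))) (0, 0) users).2 > answer.2 then
        (answer.1, (List.foldl (fun (acc : Int × Int) u =>
            if List.foldl (fun b i =>
                  if PySem.List.pyGetD (List.foldl (fun (st : List Int × Int) _i =>
                        (st.1 ++ [PySem.Int.mod st.2 4], PySem.Int.floordiv st.2 4))
                        ([], code) (PySem.List.pyRange 0 (emoticons.length : Int) 1)).1 i 0 * 10 + 10 ≥ u.1 then
                    b + PySem.List.pyGetD (PySem.List.pyGetD (List.map pvRowOf emoticons) i [])
                      (PySem.List.pyGetD (List.foldl (fun (st : List Int × Int) _i =>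
                        (st.1 ++ [PySem.Int.mod st.2 4], PySem.Int.floordiv st.2 4))
                        ([], code) (PySem.List.pyRange 0 (emoticons.length : Int) 1)).1 i 0) 0
                  else b) 0 (PySem.List.pyRange 0 (emoticons.length : Int) 1) ≥ u.2 then
              (acc.1 + 1, acc.2)
            else
              (acc.1, acc.2 + List.foldl (fun b i =>
                  if PySem.List.pyGetD (List.foldl (fun (st : List Int × Int) _i =>
                        (st.1 ++ [PySem.Int.mod st.2 4], PySem.Int.floordiv st.2 4))
                        ([], code) (PySem.List.pyRange 0 (emoticons.length : Int) 1)).1 i 0 * 10 + 10 ≥ u.1 then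
                    b + PySem.List.pyGetD (PySem.List.pyGetD (List.map pvRowOf emoticons) i [])
                      (PySem.List.pyGetD (List.foldl (fun (st : List Int × Int) _i =>
                        (st.1 ++ [PySem.Int.mod st.2 4], PySem.Int.floordiv st.2 4))
                        ([], code) (PySem.List.pyRange 0 (emoticons.length : Int) 1)).1 i 0) 0
                  else b) 0 (PySem.List.pyRange 0 (emoticons.length : Int) 1))) (0, 0) users).2)
      else answer)
      = fun (answer : Int × Int) (code : Int) =>
          pvMax answer (pvEval (List.map (fun e => PySem.Int.floordiv e 10) emoticons) users
            (pvDecode emoticons.length code ++ [])) := by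
    funext answer code
    rw [pvPrFold0 emoticons.length code]
    rw [pvEvalA' users emoticons (pvDecode emoticons.length code) emoticons.length
      (pvDecode_length _ _) rfl (fun r hr => pvDecode_mem _ _ r hr)]
    rw [List.append_nil]
    exact pvStep_eq answer _
  rw [hb]
  rw [pvMain (List.map (fun e => PySem.Int.floordiv e 10) emoticons) users emoticons.length [] (0, 0)]
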